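-- pv_equiv track=rewrite | github.com/OpenInterpretability/openinterp-swebench-harness | agent/loop.py | _find_all_seq
-- ===== SOURCE A (Python) =====
-- def _find_all_seq(tokens: list[int], needle: list[int]) -> list[int]:
--     n, m = len(tokens), len(needle)
--     if m == 0 or n < m:
--         return []
--     out = []
--     i = 0
--     while i <= n - m:
--         if tokens[i:i + m] == needle:
--             out.append(i)
--             i += m
--         else:
--             i += 1
--     return out
-- ===== SOURCE B (Python) =====
-- def _find_all_seq(tokens: list[int], needle: list[int]) -> list[int]:
--     m = len(needle)
--     if m == 0:
--         return []
--     matches = [i for i in range(len(tokens) - m + 1) if tokens[i:i + m] == needle]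
--     out = []
--     next_ok = 0
--     for i in matches:
--         if i >= next_ok:
--             out.append(i)
--             next_ok = i + m
--     return out
-- ===== Notes on version B (the rewrite author's own statement) =====
-- stated objective: alternative
-- what changed: A fuses finding and selection in one while-loop that jumps the index by m after a match; B first collects ALL (also overlapping) match positions in a single comprehension pass and then greedily filters them for non-overlap in a separate pass.
import Mathlib
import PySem

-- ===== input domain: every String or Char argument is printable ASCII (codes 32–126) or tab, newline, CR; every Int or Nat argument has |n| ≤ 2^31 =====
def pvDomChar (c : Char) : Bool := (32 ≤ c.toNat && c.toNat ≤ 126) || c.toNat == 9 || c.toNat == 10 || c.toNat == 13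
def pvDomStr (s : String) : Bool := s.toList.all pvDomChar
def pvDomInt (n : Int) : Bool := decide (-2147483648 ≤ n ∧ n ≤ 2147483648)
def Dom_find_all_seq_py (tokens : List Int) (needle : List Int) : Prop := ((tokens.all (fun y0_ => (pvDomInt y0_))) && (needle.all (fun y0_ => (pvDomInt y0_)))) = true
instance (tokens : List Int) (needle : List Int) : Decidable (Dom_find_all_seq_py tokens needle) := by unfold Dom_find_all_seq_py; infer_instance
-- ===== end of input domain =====

-- B replaces A's fused skip-by-m while-loop by two separate passes (collect all match
-- positions, then greedily keep non-overlapping ones); same cost, different decomposition.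

-- ===== PORT A =====
-- A's while-loop: on a match append i and jump by m, else step by 1 (hm gives termination)
def pvLoopA (tokens needle : List Int) (n m : Int) (hm : 1 ≤ m) (i : Int) (out : List Int) : List Int :=
  if h : i ≤ n - m then
    if PySem.List.slice tokens (some i) (some (i + m)) = needle then
      pvLoopA tokens needle n m hm (i + m) (out ++ [i])
    else
      pvLoopA tokens needle n m hm (i + 1) out
  else out
termination_by (n - i).toNat
decreasing_by all_goals omega

def find_all_seq_py (tokens : List Int) (needle : List Int) : List Int :=
  if h : (needle.length : Int) = 0 ∨ (tokens.length : Int) < (needle.length : Int) then []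
  else pvLoopA tokens needle tokens.length needle.length (by omega) 0 []

-- ===== PORT B =====
-- the comprehension: all (also overlapping) match positions, in increasing order
def pvMatches (tokens needle : List Int) : List Int :=
  (PySem.List.pyRange 0 ((tokens.length : Int) - (needle.length : Int) + 1) 1).filter
    (fun i => PySem.List.slice tokens (some i) (some (i + (needle.length : Int))) == needle)

-- one step of the greedy selection loop (state = (out, next_ok))
def pvPick (m : Int) (st : List Int × Int) (i : Int) : List Int × Int :=
  if st.2 ≤ i then (st.1 ++ [i], i + m) else st

def find_all_seq_py_alt (tokens : List Int) (needle : List Int) : List Int :=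
  if (needle.length : Int) = 0 then []
  else ((pvMatches tokens needle).foldl (pvPick (needle.length : Int)) ([], 0)).1

-- ===== PRECONDITION & SPEC =====
def Spec_find_all_seq_py (tokens : List Int) (needle : List Int) (out : List Int) : Prop := out = find_all_seq_py_alt tokens needle
instance (tokens : List Int) (needle : List Int) (out : List Int) : Decidable (Spec_find_all_seq_py tokens needle out) := by unfold Spec_find_all_seq_py; infer_instance

-- ===== CLAIM (what is proved, stated in full; the proofs are below) =====
def Claim_equal_find_all_seq_py : Prop := ∀ (tokens : List Int) (needle : List Int), Dom_find_all_seq_py tokens needle → Spec_find_all_seq_py tokens needle (find_all_seq_py tokens needle)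

-- ===== LEMMAS AND PROOFS =====

-- the tail of pvMatches from position i on
def pvMs (tokens needle : List Int) (i : Int) : List Int :=
  (PySem.List.pyRange i ((tokens.length : Int) - (needle.length : Int) + 1) 1).filter
    (fun i => PySem.List.slice tokens (some i) (some (i + (needle.length : Int))) == needle)

lemma pvMatches_eq (tokens needle : List Int) : pvMatches tokens needle = pvMs tokens needle 0 := rfl

lemma pvMs_nil (tokens needle : List Int) (i : Int)
    (h : (tokens.length : Int) - (needle.length : Int) < i) : pvMs tokens needle i = [] := by
  unfold pvMs
  rw [PySem.List.pyRange_one_eq_nil (by omega)]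
  rfl

lemma pvMs_cons (tokens needle : List Int) (i : Int)
    (h : i ≤ (tokens.length : Int) - (needle.length : Int)) :
    pvMs tokens needle i =
      if PySem.List.slice tokens (some i) (some (i + (needle.length : Int))) = needle
      then i :: pvMs tokens needle (i + 1) else pvMs tokens needle (i + 1) := by
  unfold pvMs
  rw [PySem.List.pyRange_one_cons (by omega), List.filter_cons]
  simp [beq_iff_eq]

lemma mem_pvMs (tokens needle : List Int) {i j : Int} (h : j ∈ pvMs tokens needle i) : i ≤ j := by
  unfold pvMs at h
  exact (PySem.List.mem_pyRange_one.mp (List.mem_filter.mp h).1).1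

-- the greedy loop, as a function of the starting next_ok
def pvG (m next : Int) (l : List Int) : List Int := (l.foldl (pvPick m) ([], next)).1

lemma pvFold_out (m : Int) (l : List Int) : ∀ (out : List Int) (next : Int),
    l.foldl (pvPick m) (out, next) =
      (out ++ (l.foldl (pvPick m) ([], next)).1, (l.foldl (pvPick m) ([], next)).2) := by
  induction l with
  | nil => intro out next; simp
  | cons j l ih =>
      intro out next
      by_cases h : next ≤ j
      · simp only [List.foldl_cons, pvPick, h, if_pos, List.nil_append]
        rw [ih (out ++ [j]) (j + m), ih [j] (j + m)]
        simp
      · simp only [List.foldl_cons, pvPick, h, if_neg, not_false_iff]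
        exact ih out next

lemma pvG_cons_pick (m next j : Int) (l : List Int) (h : next ≤ j) :
    pvG m next (j :: l) = j :: pvG m (j + m) l := by
  unfold pvG
  simp only [List.foldl_cons, pvPick, h, if_pos, List.nil_append]
  rw [pvFold_out m l [j] (j + m)]
  simp

lemma pvG_cons_skip (m next j : Int) (l : List Int) (h : ¬ next ≤ j) :
    pvG m next (j :: l) = pvG m next l := by
  unfold pvG
  simp [List.foldl_cons, pvPick, h]

lemma pvG_congr (m : Int) (l : List Int) : ∀ (next next' : Int),
    (∀ j ∈ l, (next ≤ j ↔ next' ≤ j)) → pvG m next l = pvG m next' l := by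
  induction l with
  | nil => intro _ _ _; rfl
  | cons j l ih =>
      intro next next' hiff
      by_cases h : next ≤ j
      · have h' : next' ≤ j := (hiff j (by simp)).mp h
        rw [pvG_cons_pick m next j l h, pvG_cons_pick m next' j l h']
      · have h' : ¬ next' ≤ j := fun hc => h ((hiff j (by simp)).mpr hc)
        rw [pvG_cons_skip m next j l h, pvG_cons_skip m next' j l h']
        exact ih next next' (fun x hx => hiff x (by simp [hx]))

lemma pvG_drop (tokens needle : List Int) : ∀ (k : Nat) (i next : Int), i ≤ next →
    (next - i).toNat = k →
    pvG (needle.length : Int) next (pvMs tokens needle i) =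
      pvG (needle.length : Int) next (pvMs tokens needle next) := by
  intro k
  induction k with
  | zero =>
      intro i next hle hk
      have : i = next := by omega
      rw [this]
  | succ k ih =>
      intro i next hle hk
      have hlt : i < next := by omega
      by_cases hb : i ≤ (tokens.length : Int) - (needle.length : Int)
      · rw [pvMs_cons tokens needle i hb]
        by_cases hp : PySem.List.slice tokens (some i) (some (i + (needle.length : Int))) = needle
        · rw [if_pos hp, pvG_cons_skip _ _ _ _ (by omega)]
          exact ih (i + 1) next (by omega) (by omega)
        · rw [if_neg hp]
          exact ih (i + 1) next (by omega) (by omega)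
      · rw [pvMs_nil tokens needle i (by omega), pvMs_nil tokens needle next (by omega)]

lemma pvLoopA_eq (tokens needle : List Int) (hm : 1 ≤ (needle.length : Int)) :
    ∀ (k : Nat) (i : Int) (out : List Int), ((tokens.length : Int) - i).toNat ≤ k →
    pvLoopA tokens needle tokens.length needle.length hm i out =
      out ++ pvG (needle.length : Int) i (pvMs tokens needle i) := by
  intro k
  induction k with
  | zero =>
      intro i out hk
      have hni : ¬ i ≤ (tokens.length : Int) - (needle.length : Int) := by omega
      rw [pvLoopA, dif_neg hni, pvMs_nil tokens needle i (by omega)]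
      simp [pvG]
  | succ k ih =>
      intro i out hk
      by_cases h : i ≤ (tokens.length : Int) - (needle.length : Int)
      · rw [pvLoopA, dif_pos h]
        by_cases hp : PySem.List.slice tokens (some i) (some (i + (needle.length : Int))) = needle
        · rw [if_pos hp, ih (i + (needle.length : Int)) (out ++ [i]) (by omega)]
          rw [pvMs_cons tokens needle i h, if_pos hp,
            pvG_cons_pick _ _ _ _ (le_refl i),
            pvG_drop tokens needle ((i + (needle.length : Int)) - (i + 1)).toNat (i + 1)
              (i + (needle.length : Int)) (by omega) rfl]
          simp
        · rw [if_neg hp, ih (i + 1) out (by omega)]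
          rw [pvMs_cons tokens needle i h, if_neg hp]
          congr 1
          exact pvG_congr (needle.length : Int) (pvMs tokens needle (i + 1)) (i + 1) i
            (fun j hj => by have := mem_pvMs tokens needle hj; omega)
      · rw [pvLoopA, dif_neg h, pvMs_nil tokens needle i (by omega)]
        simp [pvG]

-- ===== VERDICT (by name: the statement is the Claim_ definition above) =====
theorem find_all_seq_py_spec : Claim_equal_find_all_seq_py := by
  unfold Claim_equal_find_all_seq_py
  intro tokens needle _
  unfold Spec_find_all_seq_py find_all_seq_py find_all_seq_py_alt
  by_cases h0 : (needle.length : Int) = 0 ∨ (tokens.length : Int) < (needle.length : Int)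
  · rw [dif_pos h0]
    rcases h0 with hm0 | hnm
    · rw [if_pos hm0]
    · by_cases hm0 : (needle.length : Int) = 0
      · rw [if_pos hm0]
      · rw [if_neg hm0, pvMatches_eq, pvMs_nil tokens needle 0 (by omega)]
        rfl
  · rw [dif_neg h0, if_neg (by omega),
      pvLoopA_eq tokens needle (by omega) (tokens.length : Int).toNat 0 [] (by omega),
      pvMatches_eq]
    rfl
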